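-- pv_equiv track=rewrite | github.com/juanp-suarezr/PYTHON | RETO NUMEROS FIBONACCI.py | recur_fibo
-- ===== SOURCE A (Python) =====
-- def recur_fibo(n: int):
--     lista=[0,1]
--     listacubo=[0,1]
--     for x in range(2, n):
--         if len(lista)==n:
--             break
--         acum=1
--         for y in lista:
--             suma= y+acum
--             acum=suma
--             lista.append(suma)
--             listacubo.append(suma**3)
--             if len(lista)==n:
--                 break
--     return lista, listacubo
-- ===== SOURCE B (Python) =====
-- def recur_fibo(n: int):
--     lista = [0, 1]
--     while len(lista) < n:
--         lista.append(lista[-1] + lista[-2])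
--     listacubo = [f ** 3 for f in lista]
--     return lista, listacubo
-- ===== Notes on version B (the rewrite author's own statement) =====
-- stated objective: simpler
-- what changed: A fuses term and cube generation in one pass with a for-loop iterating over the list it is itself appending to and an 'acum' running accumulator; B builds the Fibonacci list with a plain while-loop on the last two elements and computes the cubes in a separate second pass.
import Mathlib
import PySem

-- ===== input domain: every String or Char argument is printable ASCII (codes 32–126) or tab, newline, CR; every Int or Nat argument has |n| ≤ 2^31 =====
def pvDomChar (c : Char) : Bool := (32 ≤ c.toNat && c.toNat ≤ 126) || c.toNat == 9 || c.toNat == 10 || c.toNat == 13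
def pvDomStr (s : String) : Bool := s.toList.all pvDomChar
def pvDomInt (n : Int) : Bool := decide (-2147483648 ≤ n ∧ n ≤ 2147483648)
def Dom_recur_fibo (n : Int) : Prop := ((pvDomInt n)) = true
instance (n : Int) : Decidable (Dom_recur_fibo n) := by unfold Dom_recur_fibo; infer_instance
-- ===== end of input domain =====

-- B replaces A's fused single pass (a for-loop appending to the list it iterates, with an 'acum' accumulator) by a plain last-two-elements while-loop followed by a separate map for the cubes; objective: simpler.



-- ===== PORT A =====
-- Inner 'for y in lista' iterates by index over a list that grows by one per step,
-- so it only ends via the 'len(lista)==n' break; 'fuel' (= n.toNat, enough steps) makes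
-- that totality explicit without changing any reachable computation.
def recurFiboInner (n : Int) : Nat → Int → Nat → List Int → List Int → List Int × List Int
  | 0, _, _, lista, listacubo => (lista, listacubo)
  | fuel + 1, acum, i, lista, listacubo =>
    if h : i < lista.length then
      let y := lista[i]
      let suma := y + acum
      let lista' := lista ++ [suma]
      let listacubo' := listacubo ++ [suma ^ 3]
      if (lista'.length : Int) == n then (lista', listacubo')
      else recurFiboInner n fuel suma (i + 1) lista' listacubo'
    else (lista, listacubo)

def recur_fibo (n : Int) : List Int × List Int :=
  (PySem.List.pyRange 2 n 1).foldl
    (fun st _x =>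
      if ((st.1.length : Int)) == n then st
      else recurFiboInner n n.toNat 1 0 st.1 st.2)
    ([0, 1], [0, 1])

-- ===== PORT B =====
def recurFiboWhile (n : Int) (lista : List Int) : List Int :=
  if (lista.length : Int) < n then
    recurFiboWhile n (lista ++ [(PySem.List.pyGet? lista (-1)).getD 0 +
                                (PySem.List.pyGet? lista (-2)).getD 0])
  else lista
termination_by (n - lista.length).toNat
decreasing_by simp; omega

def recur_fibo_alt (n : Int) : List Int × List Int :=
  let lista := recurFiboWhile n [0, 1]
  (lista, lista.map (fun f => f ^ 3))

-- ===== PRECONDITION & SPEC =====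
def Spec_recur_fibo (n : Int) (out : List Int × List Int) : Prop := out = recur_fibo_alt n
instance (n : Int) (out : List Int × List Int) : Decidable (Spec_recur_fibo n out) := by unfold Spec_recur_fibo; infer_instance

-- ===== CLAIM (what is proved, stated in full; the proofs are below) =====
def Claim_equal_recur_fibo : Prop := ∀ (n : Int), Dom_recur_fibo n → Spec_recur_fibo n (recur_fibo n)



-- ===== LEMMAS AND PROOFS =====

lemma recurFiboWhile_stop (n : Int) (l : List Int) (h : ¬ (l.length : Int) < n) :
    recurFiboWhile n l = l := by
  rw [recurFiboWhile]; simp [h]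

lemma recurFiboWhile_step (n : Int) (l : List Int) (h : (l.length : Int) < n) :
    recurFiboWhile n l
      = recurFiboWhile n (l ++ [(PySem.List.pyGet? l (-1)).getD 0 +
                                (PySem.List.pyGet? l (-2)).getD 0]) := by
  rw [recurFiboWhile]; simp [h]

lemma recurFiboWhile_length (n : Int) (l : List Int) (h : (l.length : Int) < n) :
    ((recurFiboWhile n l).length : Int) = n := by
  rw [recurFiboWhile_step n l h]
  by_cases h2 : ((l ++ [(PySem.List.pyGet? l (-1)).getD 0 +
                        (PySem.List.pyGet? l (-2)).getD 0]).length : Int) < n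
  · exact recurFiboWhile_length n _ h2
  · rw [recurFiboWhile_stop n _ h2]; simp at h2 ⊢; omega
termination_by (n - l.length).toNat
decreasing_by simp; omega

lemma pyGet_neg2 (lista : List Int) (i : Nat) (hlen : lista.length = i + 2) :
    (PySem.List.pyGet? lista (-2)).getD 0 = lista[i]'(by omega) := by
  simp [PySem.List.pyGet?, PySem.List.pyIdx?]
  rw [if_pos (by omega)]
  simp only [Option.bind_some]
  rw [show lista.length - 2 = i from by omega, List.getElem?_eq_getElem (by omega)]
  rfl

lemma pyGet_neg1 (lista : List Int) (acum : Int) (i : Nat) (hlen : lista.length = i + 2)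
    (hlast : lista.getLast? = some acum) :
    (PySem.List.pyGet? lista (-1)).getD 0 = acum := by
  simp [PySem.List.pyGet?, PySem.List.pyIdx?]
  rw [if_pos (by omega)]
  simp only [Option.bind_some]
  rw [← List.getLast?_eq_getElem?, hlast]
  rfl

-- A's inner loop, started in its invariant state, computes exactly B's while-loop result
-- together with the pointwise cubes.
lemma inner_eq (n : Int) (fuel : Nat) (lista : List Int) (acum : Int) (i : Nat)
    (hlen : lista.length = i + 2)
    (hlast : lista.getLast? = some acum)
    (hlt : (lista.length : Int) < n)
    (hfuel : n.toNat ≤ fuel + lista.length) :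
    recurFiboInner n fuel acum i lista (lista.map (fun f => f ^ 3))
      = (recurFiboWhile n lista, (recurFiboWhile n lista).map (fun f => f ^ 3)) := by
  induction fuel generalizing lista acum i with
  | zero => omega
  | succ fuel ih =>
    have hi : i < lista.length := by omega
    rw [recurFiboInner]
    simp only [hi, dite_true]
    set suma := lista[i] + acum with hsuma
    have hstep : recurFiboWhile n lista = recurFiboWhile n (lista ++ [suma]) := by
      rw [recurFiboWhile_step n lista hlt, pyGet_neg2 lista i hlen,
          pyGet_neg1 lista acum i hlen hlast, Int.add_comm acum]
    by_cases hbr : ((lista ++ [suma]).length : Int) == n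
    · simp only [hbr, if_true]
      rw [hstep, recurFiboWhile_stop]
      · simp
      · simp at hbr ⊢; omega
    · simp only [hbr]
      rw [hstep]
      have hmap : lista.map (fun f => f ^ 3) ++ [suma ^ 3]
          = (lista ++ [suma]).map (fun f => f ^ 3) := by simp
      rw [hmap]
      apply ih
      · simp [hlen]
      · simp
      · simp at hbr ⊢; omega
      · simp; omega

lemma foldl_skip (n : Int) (st : List Int × List Int) (hst : (st.1.length : Int) = n)
    (xs : List Int) :
    xs.foldl (fun st _x => if ((st.1.length : Int)) == n then st
                           else recurFiboInner n n.toNat 1 0 st.1 st.2) st = st := by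
  induction xs with
  | nil => rfl
  | cons x xs ih =>
    rw [List.foldl_cons, if_pos (by simp [hst])]
    exact ih

-- ===== VERDICT (by name: the statement is the Claim_ definition above) =====
theorem recur_fibo_spec : Claim_equal_recur_fibo := by
  intro n _hdom
  unfold Spec_recur_fibo recur_fibo recur_fibo_alt
  by_cases h3 : 3 ≤ n
  · have hr : PySem.List.pyRange 2 n 1 = 2 :: PySem.List.pyRange 3 n 1 :=
      PySem.List.pyRange_one_cons (by omega)
    rw [hr]
    simp only [List.foldl_cons]
    rw [if_neg (by simp; omega)]
    have hinner := inner_eq n n.toNat ([0, 1] : List Int) 1 0 (by simp) (by simp)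
      (by simp; omega) (by simp)
    have hcube : (([0, 1] : List Int).map (fun f => f ^ 3)) = ([0, 1] : List Int) := by
      decide
    rw [hcube] at hinner
    rw [hinner, foldl_skip n _ (recurFiboWhile_length n _ (by simp; omega)) _]
  · have hr : PySem.List.pyRange 2 n 1 = [] := by
      simp [PySem.List.pyRange]
      omega
    rw [hr]
    simp [recurFiboWhile_stop n ([0, 1] : List Int) (by simp; omega)]
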